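-- pv_equiv track=rewrite | github.com/gevra/hashtagger_plus_offline | common/text_functions.py | get_continuous_ne_chunks_from_stanford_tags
-- ===== SOURCE A (Python) =====
-- def get_continuous_ne_chunks_from_stanford_tags(tags):
--     """
--     based on https://stackoverflow.com/a/31838373/2262424
--     make sure that the text is not lowercased
--     expects as an input the an output of StanfordNERTagger().tag(StanfordTokenizer().tokenize(text))
--     """
--     continuous_chunks = []
--     current_chunk = []
--
--     for token, label in tags:
--         if label != "O":
--             # when it's a proper noun
--             current_chunk.append((token, label))
--         elif current_chunk:
--             # when the proper noun ended
--             named_entity = " ".join([t for (t, l) in current_chunk])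
--             if named_entity not in continuous_chunks:
--                 continuous_chunks.append((named_entity, current_chunk[0][1]))
--                 current_chunk = []
--         else:
--             # when there was no proper noun in the current chunk
--             continue
--
--     if current_chunk:
--         # when the proper noun is in the very end of the tags
--         named_entity = " ".join([t for (t, l) in current_chunk])
--         if named_entity not in continuous_chunks:
--             continuous_chunks.append((named_entity, current_chunk[0][1]))
--
--     continuous_chunks = [ne for ne in continuous_chunks if len(ne) > 1]
--
--     return continuous_chunks
-- ===== SOURCE B (Python) =====
-- def get_continuous_ne_chunks_from_stanford_tags(tags):
--     # Two-pointer span scan: for each maximal run of non-"O" tags, emit one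
--     # (joined tokens, first label) pair. (A's "not in" dedup compares a str
--     # against tuples and its len(ne)>1 filter sees 2-tuples, so both are no-ops.)
--     result = []
--     i, n = 0, len(tags)
--     while i < n:
--         token, label = tags[i]
--         if label == "O":
--             i += 1
--         else:
--             j = i + 1
--             while j < n and tags[j][1] != "O":
--                 j += 1
--             result.append((" ".join(t for t, _ in tags[i:j]), label))
--             i = j
--     return result
-- ===== Notes on version B (the rewrite author's own statement) =====
-- stated objective: simpler
-- what changed: Replaces A's accumulate-and-flush loop with dead dedup/filter passes (a str-vs-tuple membership test and a len-of-2-tuple filter that never fire) by a direct two-pointer scan over maximal non-'O' runs, emitting each run's joined tokens and first label in one pass.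
import Mathlib
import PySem

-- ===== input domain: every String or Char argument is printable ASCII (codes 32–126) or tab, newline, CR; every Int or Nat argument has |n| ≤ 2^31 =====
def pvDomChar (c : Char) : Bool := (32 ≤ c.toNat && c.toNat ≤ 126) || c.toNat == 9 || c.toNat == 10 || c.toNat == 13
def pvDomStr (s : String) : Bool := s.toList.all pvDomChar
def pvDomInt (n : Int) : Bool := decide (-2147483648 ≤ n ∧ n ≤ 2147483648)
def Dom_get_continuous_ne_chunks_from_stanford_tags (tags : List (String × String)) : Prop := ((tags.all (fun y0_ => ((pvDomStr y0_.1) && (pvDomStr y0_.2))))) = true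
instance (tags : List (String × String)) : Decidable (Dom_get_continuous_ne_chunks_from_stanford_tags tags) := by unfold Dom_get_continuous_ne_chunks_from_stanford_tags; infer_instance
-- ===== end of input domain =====

-- B replaces A's accumulate-and-flush loop (with its dead str-vs-tuple dedup and
-- len-of-2-tuple filter) by a two-pointer scan over maximal non-"O" runs: simpler.

-- ===== PORT A =====
-- " ".join([t for (t, l) in current_chunk])
def pvJoinA (chunk : List (String × String)) : String :=
  PySem.Str.join " " (chunk.map (fun tl => tl.1))

-- Python `named_entity == chunk_element` compares a str with a 2-tuple: always False.
def pvStrEqPair (_ : String) (_ : String × String) : Bool := false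

-- Python `len(ne)` for a 2-tuple ne: always 2.
def pvPairLen (_ : String × String) : Nat := 2

-- one iteration of A's for-loop over state (continuous_chunks, current_chunk)
def pvStepA (st : List (String × String) × List (String × String)) (p : String × String) :
    List (String × String) × List (String × String) :=
  let chunks := st.1
  let cur := st.2
  if p.2 ≠ "O" then (chunks, cur ++ [p])
  else if cur ≠ [] then
    (let ne := pvJoinA cur
     if (chunks.any (pvStrEqPair ne)) = false then
       (chunks ++ [(ne, (cur.headD ("", "")).2)], [])
     else (chunks, cur))
  else (chunks, cur)

def get_continuous_ne_chunks_from_stanford_tags (tags : List (String × String)) : List (String × String) :=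
  let st := tags.foldl pvStepA ([], [])
  let chunks := st.1
  let cur := st.2
  let chunks2 :=
    if cur ≠ [] then
      (let ne := pvJoinA cur
       if (chunks.any (pvStrEqPair ne)) = false then
         chunks ++ [(ne, (cur.headD ("", "")).2)]
       else chunks)
    else chunks
  chunks2.filter (fun ne => decide (pvPairLen ne > 1))

-- ===== PORT B =====
def pvJoinB (chunk : List (String × String)) : String :=
  PySem.Str.join " " (chunk.map (fun p => p.1))

def get_continuous_ne_chunks_from_stanford_tags_alt (tags : List (String × String)) : List (String × String) :=
  match tags with
  | [] => []
  | (t, l) :: rest =>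
    if l == "O" then get_continuous_ne_chunks_from_stanford_tags_alt rest
    else
      (pvJoinB ((t, l) :: rest.takeWhile (fun p => p.2 != "O")), l)
        :: get_continuous_ne_chunks_from_stanford_tags_alt (rest.dropWhile (fun p => p.2 != "O"))
termination_by tags.length
decreasing_by
  · simp
  · exact Nat.lt_succ_of_le (List.length_dropWhile_le _ _)

-- ===== PRECONDITION & SPEC =====
def Spec_get_continuous_ne_chunks_from_stanford_tags (tags : List (String × String)) (out : List (String × String)) : Prop := out = get_continuous_ne_chunks_from_stanford_tags_alt tags
instance (tags : List (String × String)) (out : List (String × String)) : Decidable (Spec_get_continuous_ne_chunks_from_stanford_tags tags out) := by unfold Spec_get_continuous_ne_chunks_from_stanford_tags; infer_instance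

-- ===== CLAIM (what is proved, stated in full; the proofs are below) =====
def Claim_equal_get_continuous_ne_chunks_from_stanford_tags : Prop := ∀ (tags : List (String × String)), Dom_get_continuous_ne_chunks_from_stanford_tags tags → Spec_get_continuous_ne_chunks_from_stanford_tags tags (get_continuous_ne_chunks_from_stanford_tags tags)

-- ===== LEMMAS AND PROOFS =====

lemma pv_any_false (ne : String) (l : List (String × String)) :
    l.any (pvStrEqPair ne) = false := by
  induction l with
  | nil => rfl
  | cons h t ih => simp [pvStrEqPair, ih]

lemma pv_filter_id (l : List (String × String)) :
    l.filter (fun ne => decide (pvPairLen ne > 1)) = l := by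
  induction l with
  | nil => rfl
  | cons h t ih => simp [pvPairLen, List.filter]

-- A's post-loop flush, as an explicit function of the loop state
def pvFinishA (st : List (String × String) × List (String × String)) : List (String × String) :=
  if st.2 ≠ [] then
    (if (st.1.any (pvStrEqPair (pvJoinA st.2))) = false then
       st.1 ++ [(pvJoinA st.2, (st.2.headD ("", "")).2)]
     else st.1)
  else st.1

-- continuation semantics of A's loop given the pending chunk
def pvContA (cur : List (String × String)) : List (String × String) → List (String × String)
  | [] => if cur = [] then [] else [(pvJoinA cur, (cur.headD ("", "")).2)]
  | p :: rest =>
    if p.2 ≠ "O" then pvContA (cur ++ [p]) rest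
    else if cur = [] then pvContA [] rest
    else (pvJoinA cur, (cur.headD ("", "")).2) :: pvContA [] rest

lemma pv_foldA (tags : List (String × String)) :
    ∀ (chunks cur : List (String × String)),
    pvFinishA (tags.foldl pvStepA (chunks, cur)) = chunks ++ pvContA cur tags := by
  induction tags with
  | nil =>
    intro chunks cur
    cases cur with
    | nil => simp [pvFinishA, pvContA]
    | cons h t => simp [pvFinishA, pvContA, pv_any_false]
  | cons p rest ih =>
    intro chunks cur
    rw [List.foldl_cons]
    by_cases hp : p.2 = "O"
    · by_cases hc : cur = []
      · subst hc
        have hstep : pvStepA (chunks, []) p = (chunks, []) := by simp [pvStepA, hp]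
        rw [hstep, ih]
        simp [pvContA, hp]
      · have hstep : pvStepA (chunks, cur) p
            = (chunks ++ [(pvJoinA cur, (cur.headD ("", "")).2)], []) := by
          simp [pvStepA, hp, hc, pv_any_false]
        rw [hstep, ih]
        simp [pvContA, hp, hc]
    · have hstep : pvStepA (chunks, cur) p = (chunks, cur ++ [p]) := by
        simp [pvStepA, hp]
      rw [hstep, ih]
      simp [pvContA, hp]

lemma pv_cont_alt (tags : List (String × String)) :
    (pvContA [] tags = get_continuous_ne_chunks_from_stanford_tags_alt tags) ∧
    (∀ (h : String × String) (cs : List (String × String)),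
      pvContA (h :: cs) tags
        = (pvJoinA ((h :: cs) ++ tags.takeWhile (fun p => p.2 != "O")), h.2)
            :: get_continuous_ne_chunks_from_stanford_tags_alt
                 (tags.dropWhile (fun p => p.2 != "O"))) := by
  induction tags with
  | nil =>
    constructor
    · simp [pvContA, get_continuous_ne_chunks_from_stanford_tags_alt]
    · intro h cs
      simp [pvContA, get_continuous_ne_chunks_from_stanford_tags_alt]
  | cons p rest ih =>
    obtain ⟨ih1, ih2⟩ := ih
    obtain ⟨t, l⟩ := p
    by_cases hp : l = "O"
    · have hb : ((t, l).2 != "O") = false := by simp [hp]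
      constructor
      · simp [pvContA, hp, get_continuous_ne_chunks_from_stanford_tags_alt, ih1]
      · intro h cs
        simp [pvContA, hp, ih1,
          get_continuous_ne_chunks_from_stanford_tags_alt]
    · have hb : ((t, l).2 != "O") = true := by simp [hp]
      constructor
      · have := ih2 (t, l) []
        simp only [List.nil_append] at this ⊢
        simp [pvContA, hp, get_continuous_ne_chunks_from_stanford_tags_alt, this,
          pvJoinA, pvJoinB]
      · intro h cs
        have := ih2 h (cs ++ [(t, l)])
        simp only [List.cons_append, List.append_assoc] at this ⊢
        simp [pvContA, hp, hb, this]

-- ===== VERDICT (by name: the statement is the Claim_ definition above) =====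
theorem get_continuous_ne_chunks_from_stanford_tags_spec : Claim_equal_get_continuous_ne_chunks_from_stanford_tags := by
  intro tags _
  show _ = _
  unfold get_continuous_ne_chunks_from_stanford_tags
  rw [pv_filter_id]
  have h1 := pv_foldA tags [] []
  simp only [pvFinishA] at h1
  simpa using h1.trans (by simp [(pv_cont_alt tags).1])
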